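-- pv_equiv track=rewrite | github.com/geoburdin/Math-Project | visualize_algorithms.py | heap_sort_steps
-- ===== SOURCE A (Python) =====
-- from typing import List, Iterable, Generator
--
-- def heap_sort_steps(arr: List[int]) -> Generator[List[int], None, None]:
--     a = arr.copy()
--     yield a.copy()
--     n = len(a)
--
--     def heapify(size: int, i: int) -> Generator[List[int], None, None]:
--         largest = i
--         left = 2 * i + 1
--         right = 2 * i + 2
--         if left < size and a[left] > a[largest]:
--             largest = left
--         if right < size and a[right] > a[largest]:
--             largest = right
--         if largest != i:
--             a[i], a[largest] = a[largest], a[i]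
--             yield a.copy()
--             yield from heapify(size, largest)
--
--     for i in range(n // 2 - 1, -1, -1):
--         yield from heapify(n, i)
--     for i in range(n - 1, 0, -1):
--         a[i], a[0] = a[0], a[i]
--         yield a.copy()
--         yield from heapify(i, 0)
--     yield a.copy()
-- ===== SOURCE B (Python) =====
-- from typing import List, Generator, Tuple
--
-- def _largest_child(a: List[int], size: int, cur: int) -> int:
--     """Index of the largest among cur and its in-range children (earliest on ties)."""
--     best = cur
--     left = 2 * cur + 1
--     right = 2 * cur + 2
--     if left < size and a[left] > a[best]:
--         best = left
--     if right < size and a[right] > a[best]: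
--         best = right
--     return best
--
-- def _swap_sequence(a: List[int]) -> List[Tuple[int, int]]:
--     """Heap-sort planner: mutates its own copy and records every swap as an index pair."""
--     n = len(a)
--     swaps: List[Tuple[int, int]] = []
--     def sift(size: int, cur: int) -> None:
--         while True:
--             nxt = _largest_child(a, size, cur)
--             if nxt == cur:
--                 return
--             a[cur], a[nxt] = a[nxt], a[cur]
--             swaps.append((cur, nxt))
--             cur = nxt
--     for i in range(n // 2 - 1, -1, -1):
--         sift(n, i)
--     for i in range(n - 1, 0, -1):
--         a[i], a[0] = a[0], a[i]
--         swaps.append((i, 0))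
--         sift(i, 0)
--     return swaps
--
-- def heap_sort_steps(arr: List[int]) -> Generator[List[int], None, None]:
--     a = arr.copy()
--     yield a.copy()
--     for i, j in _swap_sequence(list(a)):
--         a[i], a[j] = a[j], a[i]
--         yield a.copy()
--     yield a.copy()
-- ===== Notes on version B (the rewrite author's own statement) =====
-- stated objective: alternative
-- what changed: B splits the work in two phases: a planner that simulates the sort with an iterative sift-down and records only the swap index pairs, and a replay loop that applies each recorded swap to the array and yields a snapshot per swap; A interleaves yielding with a recursive heapify.
import Mathlib
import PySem

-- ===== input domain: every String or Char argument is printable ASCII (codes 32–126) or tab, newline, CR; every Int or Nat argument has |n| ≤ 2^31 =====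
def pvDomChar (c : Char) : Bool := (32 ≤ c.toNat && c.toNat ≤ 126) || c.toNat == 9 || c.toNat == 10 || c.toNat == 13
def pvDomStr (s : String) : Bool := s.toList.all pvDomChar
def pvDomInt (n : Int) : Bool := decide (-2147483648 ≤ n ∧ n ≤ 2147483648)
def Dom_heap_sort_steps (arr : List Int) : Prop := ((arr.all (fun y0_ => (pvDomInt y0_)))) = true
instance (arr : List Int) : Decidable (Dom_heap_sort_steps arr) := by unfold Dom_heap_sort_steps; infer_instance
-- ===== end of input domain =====

-- B is a two-phase decomposition: a planner records the swap index pairs (iterative sift-down),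
-- then a replay loop applies each swap and emits a snapshot; objective: alternative.
-- All list indexing below uses List.getD: every index used is in range on every reachable call,
-- so getD is exact for Python's a[i]. Fuel (size+1) only makes the recursion total; the sift
-- index strictly increases and stays < size, so it is always sufficient.

-- ===== PORT A =====
-- A's recursive heapify: returns the updated array and the list of yielded snapshots.
def heapifyA (fuel : Nat) (a : List Int) (size i : Nat) : List Int × List (List Int) :=
  match fuel with
  | 0 => (a, [])
  | fuel + 1 =>
    let left := 2 * i + 1
    let right := 2 * i + 2
    let l1 := if left < size ∧ a.getD left 0 > a.getD i 0 then left else i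
    let largest := if right < size ∧ a.getD right 0 > a.getD l1 0 then right else l1
    if largest ≠ i then
      let x := a.getD i 0
      let y := a.getD largest 0
      let a' := (a.set i y).set largest x
      let r := heapifyA fuel a' size largest
      (r.1, a' :: r.2)
    else (a, [])

def heap_sort_steps (arr : List Int) : List (List Int) :=
  let a := arr
  let n := arr.length
  -- build phase: i = n//2 - 1 downto 0
  let s1 := (List.range (n / 2)).reverse.foldl
    (fun (s : List Int × List (List Int)) i =>
      let r := heapifyA (n + 1) s.1 n i
      (r.1, s.2 ++ r.2)) (a, [])
  -- extract phase: i = n-1 downto 1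
  let s2 := (List.range' 1 (n - 1)).reverse.foldl
    (fun (s : List Int × List (List Int)) i =>
      let x := s.1.getD i 0
      let y := s.1.getD 0 0
      let a' := (s.1.set i y).set 0 x
      let r := heapifyA (i + 1) a' i 0
      (r.1, s.2 ++ (a' :: r.2))) s1
  arr :: (s2.2 ++ [s2.1])

-- ===== PORT B =====
-- Python's a[i], a[j] = a[j], a[i] on an index pair.
def applySwapB (a : List Int) (p : Nat × Nat) : List Int :=
  (a.set p.1 (a.getD p.2 0)).set p.2 (a.getD p.1 0)

-- index of the largest among cur and its in-range children (earliest on ties)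
def largestChildB (a : List Int) (size cur : Nat) : Nat :=
  let b1 := if 2 * cur + 1 < size ∧ a.getD (2 * cur + 1) 0 > a.getD cur 0 then 2 * cur + 1 else cur
  if 2 * cur + 2 < size ∧ a.getD (2 * cur + 2) 0 > a.getD b1 0 then 2 * cur + 2 else b1

-- The planner's iterative sift-down: walks a cursor down, swapping and recording the pair.
def siftPlanB (fuel : Nat) (a : List Int) (size cur : Nat) (sw : List (Nat × Nat)) :
    List Int × List (Nat × Nat) :=
  match fuel with
  | 0 => (a, sw)
  | fuel + 1 =>
    let nxt := largestChildB a size cur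
    if nxt = cur then (a, sw)
    else siftPlanB fuel (applySwapB a (cur, nxt)) size nxt (sw ++ [(cur, nxt)])

-- _swap_sequence: simulate the sort on a scratch array, return only the swap pairs.
def swapSeqB (a : List Int) : List (Nat × Nat) :=
  let n := a.length
  let s1 := (List.range (n / 2)).reverse.foldl
    (fun (s : List Int × List (Nat × Nat)) i => siftPlanB (n + 1) s.1 n i s.2) (a, [])
  let s2 := (List.range' 1 (n - 1)).reverse.foldl
    (fun (s : List Int × List (Nat × Nat)) i =>
      siftPlanB (i + 1) (applySwapB s.1 (i, 0)) i 0 (s.2 ++ [(i, 0)])) s1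
  s2.2

def heap_sort_steps_alt (arr : List Int) : List (List Int) :=
  let r := (swapSeqB arr).foldl
    (fun (s : List Int × List (List Int)) p =>
      let a' := applySwapB s.1 p
      (a', s.2 ++ [a'])) (arr, [])
  arr :: (r.2 ++ [r.1])

-- ===== PRECONDITION & SPEC =====
def Spec_heap_sort_steps (arr : List Int) (out : List (List Int)) : Prop := out = heap_sort_steps_alt arr
instance (arr : List Int) (out : List (List Int)) : Decidable (Spec_heap_sort_steps arr out) := by unfold Spec_heap_sort_steps; infer_instance

-- ===== CLAIM (what is proved, stated in full; the proofs are below) =====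
def Claim_equal_heap_sort_steps : Prop := ∀ (arr : List Int), Dom_heap_sort_steps arr → Spec_heap_sort_steps arr (heap_sort_steps arr)

-- ===== LEMMAS AND PROOFS =====

-- replay of a swap list from array a: (final array, snapshots), recursive form
def replayB : List Int → List (Nat × Nat) → List Int × List (List Int)
  | a, [] => (a, [])
  | a, p :: ps =>
    let a' := applySwapB a p
    let r := replayB a' ps
    (r.1, a' :: r.2)

-- the foldl in heap_sort_steps_alt computes replayB (with an accumulator in front)
theorem replay_foldl (ps : List (Nat × Nat)) : ∀ (a : List Int) (acc : List (List Int)),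
    ps.foldl (fun (s : List Int × List (List Int)) p =>
      let a' := applySwapB s.1 p
      (a', s.2 ++ [a'])) (a, acc)
    = ((replayB a ps).1, acc ++ (replayB a ps).2) := by
  induction ps with
  | nil => intro a acc; simp [replayB]
  | cons p ps ih =>
    intro a acc
    simp only [List.foldl_cons]
    rw [ih]
    simp [replayB]

theorem replay_append (ps : List (Nat × Nat)) : ∀ (qs : List (Nat × Nat)) (a : List Int),
    replayB a (ps ++ qs)
    = ((replayB (replayB a ps).1 qs).1,
        (replayB a ps).2 ++ (replayB (replayB a ps).1 qs).2) := by
  induction ps with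
  | nil => intro qs a; simp [replayB]
  | cons p ps ih => intro qs a; simp [replayB, ih]

-- one step of the sift, with the chosen child index L abstracted
theorem sift_succ_case (fuel : Nat)
    (ih : ∀ (a : List Int) (size cur : Nat) (sw : List (Nat × Nat)),
      ∃ ps, siftPlanB fuel a size cur sw = ((heapifyA fuel a size cur).1, sw ++ ps) ∧
        replayB a ps = heapifyA fuel a size cur)
    (a : List Int) (size cur : Nat) (sw : List (Nat × Nat)) (L : Nat) :
    ∃ ps,
      (if L = cur then (a, sw)
       else siftPlanB fuel (applySwapB a (cur, L)) size L (sw ++ [(cur, L)]))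
      = ((if L ≠ cur then
            ((heapifyA fuel ((a.set cur (a.getD L 0)).set L (a.getD cur 0)) size L).1,
              (a.set cur (a.getD L 0)).set L (a.getD cur 0) ::
                (heapifyA fuel ((a.set cur (a.getD L 0)).set L (a.getD cur 0)) size L).2)
          else (a, [])).1,
          sw ++ ps)
      ∧ replayB a ps
        = (if L ≠ cur then
            ((heapifyA fuel ((a.set cur (a.getD L 0)).set L (a.getD cur 0)) size L).1,
              (a.set cur (a.getD L 0)).set L (a.getD cur 0) ::
                (heapifyA fuel ((a.set cur (a.getD L 0)).set L (a.getD cur 0)) size L).2)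
          else (a, [])) := by
  by_cases hc : L = cur
  · exact ⟨[], by simp [hc], by simp [hc, replayB]⟩
  · obtain ⟨ps', hEq, hRep⟩ := ih (applySwapB a (cur, L)) size L (sw ++ [(cur, L)])
    refine ⟨(cur, L) :: ps', ?_, ?_⟩
    · rw [if_neg hc, if_pos hc, hEq]
      simp [applySwapB]
    · rw [if_pos hc]
      simp only [replayB, hRep]
      simp [applySwapB]

-- one sift of the planner: the recorded pairs, replayed, reproduce heapify exactly
theorem siftPlan_main (fuel : Nat) : ∀ (a : List Int) (size cur : Nat) (sw : List (Nat × Nat)),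
    ∃ ps, siftPlanB fuel a size cur sw = ((heapifyA fuel a size cur).1, sw ++ ps) ∧
      replayB a ps = heapifyA fuel a size cur := by
  induction fuel with
  | zero => intro a size cur sw; exact ⟨[], by simp [siftPlanB, heapifyA], by simp [replayB, heapifyA]⟩
  | succ fuel ih =>
    intro a size cur sw
    simp only [siftPlanB, heapifyA, largestChildB]
    exact sift_succ_case fuel ih a size cur sw _

-- generic two-fold invariant transport
theorem foldl_inv {α β : Type} (Inv : α → β → Prop) (fP : α → Nat → α) (fA : β → Nat → β)
    (l : List Nat) (h : ∀ x y i, Inv x y → Inv (fP x i) (fA y i)) :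
    ∀ (x : α) (y : β), Inv x y → Inv (l.foldl fP x) (l.foldl fA y) := by
  induction l with
  | nil => intro x y hxy; simpa using hxy
  | cons i l ihl => intro x y hxy; exact ihl _ _ (h x y i hxy)

-- the invariant tying the planner's fold state to A's fold state
def InvHS (a0 : List Int) (x : List Int × List (Nat × Nat)) (y : List Int × List (List Int)) :
    Prop :=
  x.1 = y.1 ∧ replayB a0 x.2 = (x.1, y.2)

theorem phase1_step (a0 : List Int) (n : Nat) (x : List Int × List (Nat × Nat))
    (y : List Int × List (List Int)) (i : Nat) (hxy : InvHS a0 x y) :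
    InvHS a0 (siftPlanB (n + 1) x.1 n i x.2)
      (let r := heapifyA (n + 1) y.1 n i; (r.1, y.2 ++ r.2)) := by
  obtain ⟨h1, h2⟩ := hxy
  obtain ⟨ps, hEq, hRep⟩ := siftPlan_main (n + 1) x.1 n i x.2
  constructor
  · rw [hEq, h1]
  · rw [hEq]
    show replayB a0 (x.2 ++ ps) = _
    rw [replay_append, h2, hRep, h1]

theorem phase2_step (a0 : List Int) (x : List Int × List (Nat × Nat))
    (y : List Int × List (List Int)) (i : Nat) (hxy : InvHS a0 x y) :
    InvHS a0 (siftPlanB (i + 1) (applySwapB x.1 (i, 0)) i 0 (x.2 ++ [(i, 0)]))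
      (let a' := (y.1.set i (y.1.getD 0 0)).set 0 (y.1.getD i 0)
       let r := heapifyA (i + 1) a' i 0
       (r.1, y.2 ++ (a' :: r.2))) := by
  obtain ⟨h1, h2⟩ := hxy
  have ha : (y.1.set i (y.1.getD 0 0)).set 0 (y.1.getD i 0) = applySwapB x.1 (i, 0) := by
    simp [applySwapB, h1]
  obtain ⟨ps, hEq, hRep⟩ :=
    siftPlan_main (i + 1) (applySwapB x.1 (i, 0)) i 0 (x.2 ++ [(i, 0)])
  constructor
  · rw [hEq]; simp only [ha]
  · rw [hEq]
    show replayB a0 (x.2 ++ [(i, 0)] ++ ps) = _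
    rw [List.append_assoc, replay_append, h2]
    have hr : replayB x.1 ([(i, 0)] ++ ps)
        = ((heapifyA (i + 1) (applySwapB x.1 (i, 0)) i 0).1,
            applySwapB x.1 (i, 0) :: (heapifyA (i + 1) (applySwapB x.1 (i, 0)) i 0).2) := by
      simp [replayB, hRep]
    rw [hr, ha]

theorem heap_sort_steps_eq (arr : List Int) : heap_sort_steps arr = heap_sort_steps_alt arr := by
  unfold heap_sort_steps heap_sort_steps_alt swapSeqB
  have h1 := foldl_inv (InvHS arr)
    (fun (s : List Int × List (Nat × Nat)) i => siftPlanB (arr.length + 1) s.1 arr.length i s.2)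
    (fun (s : List Int × List (List Int)) i =>
      let r := heapifyA (arr.length + 1) s.1 arr.length i
      (r.1, s.2 ++ r.2))
    (List.range (arr.length / 2)).reverse
    (fun x y i hxy => phase1_step arr arr.length x y i hxy)
    (arr, []) (arr, []) ⟨rfl, by simp [replayB]⟩
  have h2 := foldl_inv (InvHS arr)
    (fun (s : List Int × List (Nat × Nat)) i =>
      siftPlanB (i + 1) (applySwapB s.1 (i, 0)) i 0 (s.2 ++ [(i, 0)]))
    (fun (s : List Int × List (List Int)) i =>
      let a' := (s.1.set i (s.1.getD 0 0)).set 0 (s.1.getD i 0)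
      let r := heapifyA (i + 1) a' i 0
      (r.1, s.2 ++ (a' :: r.2)))
    (List.range' 1 (arr.length - 1)).reverse
    (fun x y i hxy => phase2_step arr x y i hxy)
    _ _ h1
  obtain ⟨hfst, hrep⟩ := h2
  rw [replay_foldl, hrep, hfst]
  simp

-- ===== VERDICT (by name: the statement is the Claim_ definition above) =====
theorem heap_sort_steps_spec : Claim_equal_heap_sort_steps := by
  intro arr _
  unfold Spec_heap_sort_steps
  exact heap_sort_steps_eq arr
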